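-- pv_equiv track=rewrite | github.com/s1monLee/CodingChallenge | LeetCode/Python3/1844_Replace_All_Digits_with_Characters.py | replaceDigits
-- ===== SOURCE A (Python) =====
-- def replaceDigits(s: str) -> str:
--     ans = ''
--     let, num = s[::2], s[1::2]
--     for i, j in zip(let, num):
--         ans+=i + chr(ord(i)+int(j))
--     if len(let)>len(num):
--         ans+=let[-1]
--     return ans
-- ===== SOURCE B (Python) =====
-- def replaceDigits(s: str) -> str:
--     out = []
--     for i, ch in enumerate(s):
--         if i % 2 == 0:
--             out.append(ch)
--         else:
--             out.append(chr(ord(s[i - 1]) + int(ch)))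
--     return ''.join(out)
-- ===== Notes on version B (the rewrite author's own statement) =====
-- stated objective: idiomatic
-- what changed: Replaces the two step-2 slices plus zip plus explicit odd-length tail guard with a single enumerate pass that branches on index parity and joins a list at the end.
import Mathlib
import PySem

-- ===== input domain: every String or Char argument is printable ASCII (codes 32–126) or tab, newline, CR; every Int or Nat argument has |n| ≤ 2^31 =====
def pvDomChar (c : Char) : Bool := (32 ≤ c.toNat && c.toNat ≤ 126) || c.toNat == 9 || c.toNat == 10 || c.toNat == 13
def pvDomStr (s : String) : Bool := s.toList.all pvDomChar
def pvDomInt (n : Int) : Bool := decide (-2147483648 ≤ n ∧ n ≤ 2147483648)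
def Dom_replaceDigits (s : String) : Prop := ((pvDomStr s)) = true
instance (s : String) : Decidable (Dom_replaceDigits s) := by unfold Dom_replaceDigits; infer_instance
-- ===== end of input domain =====

-- B replaces A's two step-2 slices + zip + odd-length tail guard by one enumerate pass branching
-- on index parity (objective: idiomatic; same O(n) cost).

-- chr(ord(a) + int(b)) for single characters a, b (shared by both ports, as in both Pythons)
def shiftC (a b : Char) : Char :=
  Char.ofNat (((a.toNat : Int) + (PySem.Int.ofChars? [b]).getD 0).toNat)

-- ===== PORT A =====
def replaceDigits (s : String) : String :=
  let cs := s.toList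
  let lt := (PySem.List.slice? cs none none 2).getD []      -- s[::2]
  let nm := (PySem.List.slice? cs (some 1) none 2).getD []  -- s[1::2]
  let ans := (lt.zip nm).foldl
    (fun ans p => ans ++ ([p.1] ++ [shiftC p.1 p.2])) ([] : List Char)
  let ans := if lt.length > nm.length
    then ans ++ [(PySem.List.pyGet? lt (-1)).getD default]  -- let[-1]; guard makes it in range
    else ans
  String.ofList ans

-- ===== PORT B =====
def replaceDigits_alt (s : String) : String :=
  let cs := s.toList
  let out := (PySem.List.enumerate cs 0).foldl
    (fun out p => out ++
      (if PySem.Int.mod p.1 2 == 0 then [p.2]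
       else [shiftC ((PySem.List.pyGet? cs (p.1 - 1)).getD default) p.2])) ([] : List Char)
  String.ofList out

-- ===== PRECONDITION & SPEC =====
-- the characters of s at odd indices (s[1::2]); used to state Pre_
def oddChars : List Char → List Char
  | [] => []
  | [_] => []
  | _ :: b :: t => b :: oddChars t

-- Pre_ excludes exactly the inputs on which Python A raises ValueError: int(j) is applied to
-- every character at an odd index, so all of them must be decimal digits.
def Pre_replaceDigits (s : String) : Prop := (oddChars s.toList).all (fun c => c.isDigit) = true
instance (s : String) : Decidable (Pre_replaceDigits s) := by unfold Pre_replaceDigits; infer_instance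

def pvWitness_replaceDigits : String := "a1"

def Spec_replaceDigits (s : String) (out : String) : Prop := out = replaceDigits_alt s
instance (s : String) (out : String) : Decidable (Spec_replaceDigits s out) := by unfold Spec_replaceDigits; infer_instance

-- ===== CLAIM (what is proved, stated in full; the proofs are below) =====
def Claim_equal_replaceDigits : Prop := ∀ (s : String), Dom_replaceDigits s → Pre_replaceDigits s → Spec_replaceDigits s (replaceDigits s)

-- ===== LEMMAS AND PROOFS =====

-- every-second-element lists: evens cs = cs[::2]
def evens : List Char → List Char
  | [] => []
  | [a] => [a]
  | a :: _ :: t => a :: evens t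

theorem evens_cons (x : Char) (l : List Char) : evens (x :: l) = x :: evens l.tail := by
  cases l <;> rfl

-- the common recursive shape both ports are shown to compute
def fSpec : List Char → List Char
  | [] => []
  | [a] => [a]
  | a :: b :: t => a :: shiftC a b :: fSpec t

theorem filterMap_two_step (cs : List Char) :
    List.filterMap (fun k : Nat => cs[2 * k]?) (List.range ((cs.length + 1) / 2)) = evens cs := by
  induction cs using evens.induct with
  | case1 => rfl
  | case2 a => simp [List.range_succ, evens]
  | case3 a b t ih =>
    have hlen : ((a :: b :: t).length + 1) / 2 = (t.length + 1) / 2 + 1 := by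
      simp [List.length_cons]; omega
    rw [hlen, List.range_succ_eq_map, List.filterMap_cons, List.filterMap_map]
    have h0 : (a :: b :: t)[2 * 0]? = some a := rfl
    rw [h0]
    have hfun : ((fun k : Nat => (a :: b :: t)[2 * k]?) ∘ Nat.succ) = fun k : Nat => t[2 * k]? := by
      funext k
      show (a :: b :: t)[2 * (k + 1)]? = t[2 * k]?
      rw [show 2 * (k + 1) = (2 * k + 1) + 1 from by ring]
      simp
    rw [hfun, ih, evens]

theorem slice_evens (cs : List Char) :
    PySem.List.slice? cs none none 2 = some (evens cs) := by
  rw [← filterMap_two_step]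
  simp only [PySem.List.slice?, PySem.List.sliceIndices]
  norm_num
  have hidx : ∀ kk : Nat, ((2 : Int) * (kk : Int)).toNat = 2 * kk := by intro kk; omega
  simp only [hidx]
  congr 1
  split_ifs <;> exact congrArg List.range (by omega)

theorem slice_odds (cs : List Char) :
    PySem.List.slice? cs (some 1) none 2 = some (evens cs.tail) := by
  rw [← filterMap_two_step]
  simp only [PySem.List.slice?, PySem.List.sliceIndices]
  norm_num
  rcases cs with _ | ⟨x, l⟩
  · rfl
  · congr 1
    · funext kk
      congr 1
      simp only [List.length_cons]
      omega
    · exact congrArg List.range (by simp only [List.length_cons]; split_ifs <;> omega)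

theorem pyGet_neg_one_cons (x : Char) (l : List Char) (h : l ≠ []) :
    PySem.List.pyGet? (x :: l) (-1) = PySem.List.pyGet? l (-1) := by
  simp only [PySem.List.pyGet?, PySem.List.pyIdx?]
  rcases l with _ | ⟨y, m⟩
  · exact absurd rfl h
  · simp only [List.length_cons]
    norm_num
    rfl

-- A's core: zip of the two slices, flat-mapped, plus the odd-length tail
theorem aCore (cs : List Char) :
    ((evens cs).zip (evens cs.tail)).flatMap (fun p => [p.1] ++ [shiftC p.1 p.2]) ++
      (if (evens cs).length > (evens cs.tail).length
        then [(PySem.List.pyGet? (evens cs) (-1)).getD default] else []) = fSpec cs := by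
  induction cs using evens.induct with
  | case1 => rfl
  | case2 a => rfl
  | case3 a b t ih =>
    rw [show evens (a :: b :: t) = a :: evens t from rfl,
        show (a :: b :: t).tail = b :: t from rfl, evens_cons b t]
    simp only [List.zip_cons_cons, List.flatMap_cons, List.length_cons, gt_iff_lt] at *
    by_cases hlen : (evens t.tail).length < (evens t).length
    · have hne : evens t ≠ [] := by
        intro he; rw [he] at hlen; simp at hlen
      rw [if_pos (by omega : (evens t.tail).length + 1 < (evens t).length + 1)]
      rw [pyGet_neg_one_cons a (evens t) hne]
      rw [if_pos hlen] at ih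
      rw [fSpec]
      simp only [List.cons_append, List.nil_append] at *
      rw [ih]
    · rw [if_neg (by omega : ¬ ((evens t.tail).length + 1 < (evens t).length + 1))]
      rw [if_neg hlen] at ih
      rw [fSpec]
      simp only [List.cons_append, List.nil_append, List.append_nil] at *
      rw [ih]

-- B's per-element contribution
def gB (cs : List Char) (p : Int × Char) : List Char :=
  if PySem.Int.mod p.1 2 == 0 then [p.2]
  else [shiftC ((PySem.List.pyGet? cs (p.1 - 1)).getD default) p.2]

theorem bCore (t : List Char) : ∀ (pre : List Char), 2 ∣ pre.length →
    (PySem.List.enumerate t (pre.length : Int)).flatMap (gB (pre ++ t)) = fSpec t := by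
  induction t using fSpec.induct with
  | case1 => intro pre _; rfl
  | case2 a =>
    intro pre hdvd
    simp only [PySem.List.enumerate, List.flatMap_cons,
      List.flatMap_nil, List.append_nil, gB]
    have : PySem.Int.mod (pre.length : Int) 2 = ((pre.length % 2 : Nat) : Int) :=
      PySem.Int.mod_natCast pre.length 2
    rw [this]
    obtain ⟨k, hk⟩ := hdvd
    simp [hk, Nat.mul_mod_right, fSpec]
  | case3 a b t ih =>
    intro pre hdvd
    simp only [PySem.List.enumerate_cons, List.flatMap_cons, gB]
    have hmod0 : PySem.Int.mod (pre.length : Int) 2 = ((pre.length % 2 : Nat) : Int) :=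
      PySem.Int.mod_natCast pre.length 2
    obtain ⟨k, hk⟩ := hdvd
    have h1 : (PySem.Int.mod (pre.length : Int) 2 == 0) = true := by
      rw [hmod0, hk]; simp [Nat.mul_mod_right]
    have h2 : (PySem.Int.mod ((pre.length : Int) + 1) 2 == 0) = false := by
      have hm := PySem.Int.mod_natCast (pre.length + 1) 2
      rw [Nat.cast_add, Nat.cast_one, Nat.cast_ofNat] at hm
      rw [hm, show (pre.length + 1) % 2 = 1 from by omega]
      rfl
    rw [h1]
    simp only [if_true]
    rw [h2]
    simp only [if_false, Bool.false_eq_true]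
    have hget : (PySem.List.pyGet? (pre ++ a :: b :: t) ((pre.length : Int) + 1 - 1)).getD default = a := by
      have : ((pre.length : Int) + 1 - 1) = ((pre.length : Nat) : Int) := by ring
      rw [this, PySem.List.pyGet?_natCast]
      rw [List.getElem?_append_right (Nat.le_refl _)]
      simp
    rw [hget]
    have hrest : (PySem.List.enumerate t ((pre.length : Int) + 1 + 1)).flatMap (gB (pre ++ a :: b :: t)) = fSpec t := by
      have heq : pre ++ a :: b :: t = (pre ++ [a, b]) ++ t := by simp
      have hlen : ((pre.length : Int) + 1 + 1) = (((pre ++ [a, b]).length : Nat) : Int) := by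
        simp [List.length_append]
        omega
      rw [heq, hlen]
      exact ih (pre ++ [a, b]) (by simp; omega)
    rw [hrest, fSpec]
    simp

theorem portA_eq_fSpec (s : String) : replaceDigits s = String.ofList (fSpec s.toList) := by
  simp only [replaceDigits]
  rw [slice_evens, slice_odds]
  simp only [Option.getD_some]
  rw [PySem.List.foldl_append_eq_flatMap (fun p : Char × Char => [p.1] ++ [shiftC p.1 p.2])]
  rw [List.nil_append, ← aCore s.toList]
  congr 1
  split_ifs <;> simp

theorem portB_eq_fSpec (s : String) : replaceDigits_alt s = String.ofList (fSpec s.toList) := by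
  simp only [replaceDigits_alt]
  rw [show (fun (out : List Char) (p : Int × Char) => out ++
        if PySem.Int.mod p.1 2 == 0 then [p.2]
        else [shiftC ((PySem.List.pyGet? s.toList (p.1 - 1)).getD default) p.2]) =
      fun (out : List Char) p => out ++ gB s.toList p from rfl]
  rw [PySem.List.foldl_append_eq_flatMap (gB s.toList)]
  rw [List.nil_append]
  have hb := bCore s.toList [] (by simp)
  simp only [List.nil_append, List.length_nil, Nat.cast_zero] at hb
  rw [hb]

-- ===== VERDICT (by name: the statement is the Claim_ definition above) =====
theorem replaceDigits_spec : Claim_equal_replaceDigits := by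
  intro s _ _
  unfold Spec_replaceDigits
  rw [portA_eq_fSpec, portB_eq_fSpec]
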